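-- pv_equiv track=rewrite | github.com/MrBrantCode/unitest_baseline | mut_generate/mist_train_cf/cf_48175/solution.py | max_sum_subsets
-- ===== SOURCE A (Python) =====
-- def max_sum_subsets(nums):
--     # The total number of subsets is 2^n. So generate numbers from 0..2^n
--     max_sum = float('-inf')
--     max_sum_subsets = []
--     total_combinations = 2 ** len(nums)
--     for count in range(total_combinations):
--         subset = []
--         subset_sum = 0
--         for j in range(len(nums)):
--             # check if jth bit in the counter is set. If set then print jth element from set.
--             if (count & (1 << j)) > 0:
--                 subset.append(nums[j])
--                 subset_sum += nums[j]
--         if subset_sum > max_sum: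
--             max_sum = subset_sum
--             max_sum_subsets = [subset]
--         elif subset_sum == max_sum:
--             max_sum_subsets.append(subset)
--
--     return max_sum_subsets
-- ===== SOURCE B (Python) =====
-- def max_sum_subsets(nums):
--     # Max sum = sum of positives; the optimal subsets contain every positive,
--     # no negative, and any subset of the zeros. Build them right-to-left:
--     # processing nums reversed keeps A's bitmask (ascending counter) order.
--     subsets = [[]]
--     for x in reversed(nums):
--         if x > 0:
--             subsets = [[x] + s for s in subsets]
--         elif x == 0:
--             subsets = [t for s in subsets for t in (s, [x] + s)]
--         # x < 0: a negative never belongs to a max-sum subset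
--     return subsets
-- ===== Notes on version B (the rewrite author's own statement) =====
-- stated objective: faster
-- what changed: Instead of enumerating all 2^n bitmasks and keeping a running max, B builds the max-sum subsets directly in one right-to-left pass: every positive is prepended to all current subsets, every zero doubles the list (with/without), negatives are skipped; this reproduces A's bitmask order.
import Mathlib
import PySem

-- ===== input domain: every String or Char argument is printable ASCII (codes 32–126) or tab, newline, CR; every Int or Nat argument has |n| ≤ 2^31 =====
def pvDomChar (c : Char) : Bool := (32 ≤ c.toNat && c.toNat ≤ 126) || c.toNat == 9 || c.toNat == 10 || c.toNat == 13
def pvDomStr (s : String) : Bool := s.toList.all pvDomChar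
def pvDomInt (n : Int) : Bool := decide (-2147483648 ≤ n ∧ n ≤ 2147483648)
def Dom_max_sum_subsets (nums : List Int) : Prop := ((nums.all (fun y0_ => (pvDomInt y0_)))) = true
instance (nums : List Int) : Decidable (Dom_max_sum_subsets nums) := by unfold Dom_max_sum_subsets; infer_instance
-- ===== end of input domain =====

-- B replaces A's enumeration of all 2^n bitmasks by one right-to-left pass that
-- builds the max-sum subsets directly (objective: faster).

-- ===== PORT A =====
-- counters `count`, `j` from range(...) are nonnegative Python ints, carried as Nat;
-- `&` and `<<` on Nat are Python-exact for nonnegative operands; float('-inf') is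
-- carried as `none` (strictly below every integer, exactly its role in A).
def max_sum_subsets (nums : List Int) : List (List Int) :=
  ((List.range (2 ^ nums.length)).foldl
    (fun (st : Option Int × List (List Int)) count =>
      let p := (List.range nums.length).foldl
        (fun (q : List Int × Int) j =>
          if 0 < count &&& (1 <<< j) then
            (q.1 ++ [PySem.List.pyGetD nums (j : Int) 0], q.2 + PySem.List.pyGetD nums (j : Int) 0)
          else q) ([], 0)
      match st.1 with
      | none => (some p.2, [p.1])
      | some m =>
        if p.2 > m then (some p.2, [p.1])
        else if p.2 = m then (st.1, st.2 ++ [p.1])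
        else st)
    (none, [])).2

-- ===== PORT B =====
def max_sum_subsets_alt (nums : List Int) : List (List Int) :=
  nums.foldr (fun x subsets =>
    if x > 0 then subsets.map (fun s => x :: s)
    else if x = 0 then subsets.flatMap (fun s => [s, x :: s])
    else subsets) [[]]

-- ===== PRECONDITION & SPEC =====
def Spec_max_sum_subsets (nums : List Int) (out : List (List Int)) : Prop := out = max_sum_subsets_alt nums
instance (nums : List Int) (out : List (List Int)) : Decidable (Spec_max_sum_subsets nums out) := by unfold Spec_max_sum_subsets; infer_instance

-- ===== CLAIM (what is proved, stated in full; the proofs are below) =====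
def Claim_equal_max_sum_subsets : Prop := ∀ (nums : List Int), Dom_max_sum_subsets nums → Spec_max_sum_subsets nums (max_sum_subsets nums)

-- ===== LEMMAS AND PROOFS =====

-- the subset A extracts for bitmask `count` (bit j picks nums[j], in index order)
def pvSel : Nat → List Int → List Int
  | _, [] => []
  | c, x :: xs => if c % 2 = 1 then x :: pvSel (c / 2) xs else pvSel (c / 2) xs

-- all 2^n subsets in A's bitmask order
def pvSubs (nums : List Int) : List (List Int) :=
  (List.range (2 ^ nums.length)).map (fun c => pvSel c nums)

-- running maximum of subset sums, started at m
def pvMaxFrom (m : Int) (L : List (List Int)) : Int :=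
  L.foldl (fun acc y => max acc y.sum) m

def pvM (nums : List Int) : Int := pvMaxFrom 0 (pvSubs nums)

-- A's outer-loop body, on the already-extracted subset
def pvStep (st : Option Int × List (List Int)) (s : List Int) : Option Int × List (List Int) :=
  match st.1 with
  | none => (some s.sum, [s])
  | some m =>
    if s.sum > m then (some s.sum, [s])
    else if s.sum = m then (st.1, st.2 ++ [s])
    else st

lemma pvSel_zero (nums : List Int) : pvSel 0 nums = [] := by
  induction nums with
  | nil => rfl
  | cons x xs ih => simp [pvSel, ih]

lemma pvFoldPair (l : List Nat) (p : Nat → Bool) (g : Nat → Int) :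
    ∀ (s : List Int) (t : Int),
    l.foldl (fun (q : List Int × Int) j =>
        if p j then (q.1 ++ [g j], q.2 + g j) else q) (s, t)
      = (s ++ (l.filter p).map g, t + ((l.filter p).map g).sum) := by
  induction l with
  | nil => simp
  | cons a l ih =>
    intro s t
    by_cases h : p a
    · simp only [List.foldl_cons, h, if_pos, List.filter_cons_of_pos h, List.map_cons,
        List.sum_cons, ih]
      simp [List.append_assoc, add_assoc]
    · simp [List.foldl_cons, h, List.filter_cons_of_neg, ih s t]

lemma pvBit (count j : Nat) :
    (decide (0 < count &&& (1 <<< j))) = count.testBit j := by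
  have h1 : (1 : Nat) <<< j = 2 ^ j := by rw [Nat.shiftLeft_eq, one_mul]
  rw [h1, Nat.and_two_pow]
  cases h : count.testBit j <;> simp

lemma pvSel_eq (nums : List Int) : ∀ (count : Nat),
    ((List.range nums.length).filter (fun j => decide (0 < count &&& (1 <<< j)))).map
        (fun (j : Nat) => PySem.List.pyGetD nums (j : Int) 0)
      = pvSel count nums := by
  induction nums with
  | nil => intro count; simp [pvSel]
  | cons x xs ih =>
    intro count
    rw [List.length_cons, List.range_succ_eq_map, List.filter_cons]
    have hf : (fun j => decide (0 < count &&& (1 <<< j))) ∘ Nat.succ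
        = (fun j => decide (0 < (count / 2) &&& (1 <<< j))) := by
      funext j
      show (decide (0 < count &&& (1 <<< (j + 1)))) = _
      rw [pvBit, pvBit, Nat.testBit_add_one]
    have hg : ((List.range xs.length).filter
          (fun j => decide (0 < (count / 2) &&& (1 <<< j)))).map
          ((fun (j : Nat) => PySem.List.pyGetD (x :: xs) (j : Int) 0) ∘ Nat.succ)
        = pvSel (count / 2) xs := by
      rw [← ih (count / 2)]
      apply List.map_congr_left
      intro j _
      show PySem.List.pyGetD (x :: xs) ((j + 1 : Nat) : Int) 0 = _
      rw [PySem.List.pyGetD_natCast, PySem.List.pyGetD_natCast, List.getD_cons_succ]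
    have hbit0 : (decide (0 < count &&& (1 <<< 0))) = decide (count % 2 = 1) := by
      rw [Nat.shiftLeft_zero, Nat.and_one_is_mod]
      have := Nat.mod_lt count (y := 2) (by omega)
      by_cases h : count % 2 = 1 <;> simp [h] <;> omega
    rw [List.filter_map, hf]
    by_cases h : count % 2 = 1
    · rw [hbit0]
      simp only [h, decide_true, if_pos, List.map_cons, List.map_map, hg]
      simp [pvSel, h]
    · rw [hbit0]
      simp only [h, decide_false, if_neg, List.map_map, hg, Bool.false_eq_true,
        not_false_iff]
      simp [pvSel, h]

lemma pvInner (nums : List Int) (count : Nat) :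
    (List.range nums.length).foldl
        (fun (q : List Int × Int) j =>
          if 0 < count &&& (1 <<< j) then
            (q.1 ++ [PySem.List.pyGetD nums (j : Int) 0], q.2 + PySem.List.pyGetD nums (j : Int) 0)
          else q) ([], 0)
      = (pvSel count nums, (pvSel count nums).sum) := by
  have := pvFoldPair (List.range nums.length)
      (fun j => decide (0 < count &&& (1 <<< j)))
      (fun j => PySem.List.pyGetD nums (j : Int) 0) [] 0
  simp only [decide_eq_true_eq] at this
  rw [this, pvSel_eq nums count]
  simp

lemma pvCollect (L : List (List Int)) : ∀ (m : Int) (subs : List (List Int)),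
    L.foldl pvStep (some m, subs)
      = (some (pvMaxFrom m L),
         (if m = pvMaxFrom m L then subs else [])
           ++ L.filter (fun s => decide (s.sum = pvMaxFrom m L))) := by
  induction L with
  | nil => intro m subs; simp [pvMaxFrom]
  | cons s L ih =>
    intro m subs
    have hM : ∀ m', m' ≤ pvMaxFrom m' L :=
      fun m' => (PySem.List.le_foldl_max_int L List.sum m').1
    have hstep : pvMaxFrom m (s :: L) = pvMaxFrom (max m s.sum) L := rfl
    rcases lt_trichotomy s.sum m with h | h | h
    · have hmax : max m s.sum = m := max_eq_left h.le
      have hne : ¬ (s.sum = pvMaxFrom m L) := by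
        have := hM m; omega
      simp only [List.foldl_cons, pvStep, if_neg (by omega : ¬ s.sum > m), if_neg (by omega : ¬ s.sum = m)]
      rw [ih m subs, hstep, hmax, List.filter_cons]
      simp [hne]
    · have hmax : max m s.sum = m := by omega
      simp only [List.foldl_cons, pvStep, if_neg (by omega : ¬ s.sum > m), if_pos h]
      rw [ih m (subs ++ [s]), hstep, hmax, List.filter_cons]
      by_cases hm : m = pvMaxFrom m L
      · rw [← hm]; simp [h]
      · have hs' : ¬ (s.sum = pvMaxFrom m L) := by rw [h]; exact hm
        simp [hm, hs']
    · have hmax : max m s.sum = s.sum := max_eq_right h.le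
      have hne : ¬ (m = pvMaxFrom s.sum L) := by
        have := hM s.sum; omega
      simp only [List.foldl_cons, pvStep, if_pos (by omega : s.sum > m)]
      rw [ih s.sum [s], hstep, hmax, List.filter_cons]
      by_cases hs : s.sum = pvMaxFrom s.sum L
      · rw [← hs, if_pos rfl, if_neg (by omega : ¬ (m = s.sum))]
        simp
      · simp [hs, hne]

lemma pvCollect0 (T : List (List Int)) :
    (([] : List Int) :: T).foldl pvStep (none, [])
      = (some (pvMaxFrom 0 (([] : List Int) :: T)),
         (([] : List Int) :: T).filter
           (fun s => decide (s.sum = pvMaxFrom 0 (([] : List Int) :: T)))) := by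
  have h0 : pvStep (none, []) ([] : List Int) = (some 0, [[]]) := by simp [pvStep]
  have hM : pvMaxFrom 0 (([] : List Int) :: T) = pvMaxFrom 0 T := by
    show pvMaxFrom (max 0 (List.sum ([] : List Int))) T = _
    simp
  rw [List.foldl_cons, h0, pvCollect T 0 [[]], hM, List.filter_cons]
  by_cases h : (0 : Int) = pvMaxFrom 0 T
  · rw [← h]; simp
  · simp [h]

lemma pvSubs_head (nums : List Int) : ∃ T, pvSubs nums = ([] : List Int) :: T := by
  obtain ⟨k, hk⟩ : ∃ k, 2 ^ nums.length = k + 1 :=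
    ⟨2 ^ nums.length - 1, by have : 0 < 2 ^ nums.length := Nat.two_pow_pos _; omega⟩
  refine ⟨(List.range k).map (fun c => pvSel (Nat.succ c) nums), ?_⟩
  rw [pvSubs, hk, List.range_succ_eq_map, List.map_cons, pvSel_zero, List.map_map]
  rfl

lemma pvA (nums : List Int) :
    max_sum_subsets nums = (pvSubs nums).filter (fun s => decide (s.sum = pvM nums)) := by
  have hbody : (fun (st : Option Int × List (List Int)) (count : Nat) =>
      let p := (List.range nums.length).foldl
        (fun (q : List Int × Int) j =>
          if 0 < count &&& (1 <<< j) then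
            (q.1 ++ [PySem.List.pyGetD nums (j : Int) 0], q.2 + PySem.List.pyGetD nums (j : Int) 0)
          else q) ([], 0)
      match st.1 with
      | none => (some p.2, [p.1])
      | some m =>
        if p.2 > m then (some p.2, [p.1])
        else if p.2 = m then (st.1, st.2 ++ [p.1])
        else st)
      = (fun st count => pvStep st (pvSel count nums)) := by
    funext st count
    simp only [pvInner nums count]
    obtain ⟨o, l⟩ := st
    cases o <;> rfl
  unfold max_sum_subsets
  rw [hbody, ← List.foldl_map]
  rw [show (List.range (2 ^ nums.length)).map (fun c => pvSel c nums) = pvSubs nums from rfl]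
  obtain ⟨T, hT⟩ := pvSubs_head nums
  rw [pvM, hT, pvCollect0 T]

lemma pvRange_two_mul : ∀ K : Nat, List.range (2 * K) = (List.range K).flatMap (fun q => [2 * q, 2 * q + 1]) := by
  intro K
  induction K with
  | zero => rfl
  | succ K ih =>
    rw [show 2 * (K + 1) = (2 * K + 1) + 1 from by omega, List.range_succ, List.range_succ,
      List.range_succ, List.flatMap_append, ← ih]
    simp

lemma pvSubs_cons (x : Int) (xs : List Int) :
    pvSubs (x :: xs) = (pvSubs xs).flatMap (fun s => [s, x :: s]) := by
  rw [pvSubs, List.length_cons, show 2 ^ (xs.length + 1) = 2 * 2 ^ xs.length from by ring,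
    pvRange_two_mul, List.map_flatMap, pvSubs, List.flatMap_map]
  apply List.flatMap_congr
  intro q _
  have h1 : (2 * q) % 2 = 0 := by omega
  have h2 : (2 * q) / 2 = q := by omega
  have h3 : (2 * q + 1) % 2 = 1 := by omega
  have h4 : (2 * q + 1) / 2 = q := by omega
  simp [pvSel, h1, h2, h3, h4]

lemma pvMaxFrom_shift (x : Int) (L : List (List Int)) : ∀ m : Int,
    L.foldl (fun a s => max a (x + s.sum)) (x + m) = x + pvMaxFrom m L := by
  induction L with
  | nil => intro m; simp [pvMaxFrom]
  | cons s L ih =>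
    intro m
    show L.foldl _ (max (x + m) (x + s.sum)) = x + pvMaxFrom (max m s.sum) L
    rw [Int.max_add_left, ih]

lemma pvMaxFrom_flatMap (x : Int) (L : List (List Int)) : ∀ m : Int,
    pvMaxFrom m (L.flatMap (fun s => [s, x :: s]))
      = L.foldl (fun a s => max (max a s.sum) (x + s.sum)) m := by
  induction L with
  | nil => intro m; rfl
  | cons s L ih =>
    intro m
    rw [List.flatMap_cons, pvMaxFrom, List.foldl_append, ← pvMaxFrom, ih]
    simp [List.foldl_cons]

lemma pvM_cons (x : Int) (xs : List Int) :
    pvM (x :: xs) = if 0 < x then x + pvM xs else pvM xs := by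
  rw [pvM, pvSubs_cons, pvMaxFrom_flatMap]
  by_cases hx : 0 < x
  · rw [if_pos hx]
    have hfun : (fun (a : Int) (s : List Int) => max (max a s.sum) (x + s.sum))
        = (fun a s => max a (x + s.sum)) := by
      funext a s; omega
    rw [hfun]
    obtain ⟨T, hT⟩ := pvSubs_head xs
    rw [hT, List.foldl_cons, pvM, hT]
    rw [show max 0 (x + List.sum ([] : List Int)) = x + 0 from by simp; omega,
      pvMaxFrom_shift]
    show _ = x + pvMaxFrom (max 0 (List.sum ([] : List Int))) T
    simp
  · rw [if_neg hx]
    have hfun : (fun (a : Int) (s : List Int) => max (max a s.sum) (x + s.sum))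
        = (fun a s => max a s.sum) := by
      funext a s; omega
    rw [hfun]; rfl

lemma pvFlatMap_ite_nil (l : List (List Int)) (p : List Int → Bool) (f : List Int → List (List Int)) :
    l.flatMap (fun s => if p s then f s else []) = (l.filter p).flatMap f := by
  induction l with
  | nil => rfl
  | cons a l ih =>
    by_cases h : p a <;> simp [h, ih]

lemma pvB (nums : List Int) :
    max_sum_subsets_alt nums = (pvSubs nums).filter (fun s => decide (s.sum = pvM nums)) := by
  induction nums with
  | nil => decide
  | cons x xs ih =>
    have hub : ∀ s ∈ pvSubs xs, s.sum ≤ pvM xs :=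
      (PySem.List.le_foldl_max_int (pvSubs xs) List.sum 0).2
    have hcons : ∀ p : List Int → Bool,
        (pvSubs (x :: xs)).filter p = (pvSubs xs).flatMap (fun s => (([s, x :: s]).filter p)) := by
      intro p; rw [pvSubs_cons, List.filter_flatMap]
    show (if x > 0 then (max_sum_subsets_alt xs).map (fun s => x :: s)
      else if x = 0 then (max_sum_subsets_alt xs).flatMap (fun s => [s, x :: s])
      else max_sum_subsets_alt xs) = _
    rcases lt_trichotomy x 0 with hx | hx | hx
    · rw [if_neg (by omega), if_neg (by omega), ih, hcons, pvM_cons, if_neg (by omega)]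
      rw [show (pvSubs xs).flatMap
            (fun s => ([s, x :: s]).filter (fun s => decide (s.sum = pvM xs)))
          = (pvSubs xs).flatMap
            (fun s => if decide (s.sum = pvM xs) then [s] else []) from
        List.flatMap_congr (fun s hs => by
          have h1 : ¬ (x + List.sum s = pvM xs) := by
            have := hub s hs; omega
          by_cases h2 : List.sum s = pvM xs <;>
            simp [List.filter, h1, h2, hx.ne])]
      rw [pvFlatMap_ite_nil]
      simp
    · rw [if_neg (by omega), if_pos hx, ih, hcons, pvM_cons, if_neg (by omega)]
      rw [show (pvSubs xs).flatMap
            (fun s => ([s, x :: s]).filter (fun s => decide (s.sum = pvM xs)))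
          = (pvSubs xs).flatMap
            (fun s => if decide (s.sum = pvM xs) then [s, x :: s] else []) from
        List.flatMap_congr (fun s hs => by
          by_cases h2 : List.sum s = pvM xs <;> simp [List.filter, hx, h2])]
      rw [pvFlatMap_ite_nil]
    · rw [if_pos hx, ih, hcons, pvM_cons, if_pos hx]
      rw [show (pvSubs xs).flatMap
            (fun s => ([s, x :: s]).filter (fun s => decide (s.sum = x + pvM xs)))
          = (pvSubs xs).flatMap
            (fun s => if decide (s.sum = pvM xs) then [x :: s] else []) from
        List.flatMap_congr (fun s hs => by
          have h1 : ¬ (List.sum s = x + pvM xs) := by have := hub s hs; omega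
          by_cases h3 : List.sum s = pvM xs <;>
            simp [List.filter, h1, h3, hx.ne'])]
      rw [pvFlatMap_ite_nil, ← List.map_eq_flatMap]

-- ===== VERDICT (by name: the statement is the Claim_ definition above) =====
theorem max_sum_subsets_spec : Claim_equal_max_sum_subsets := by
  intro nums _
  unfold Spec_max_sum_subsets
  rw [pvA, pvB]
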